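-- pv_equiv track=rewrite | github.com/na-nnaaa/Nyarqui-2026-1 | Lab_1/LAB1_202473562-4_202473521-7.py | octal_a_hexadecimal
-- ===== SOURCE A (Python) =====
-- def octal_a_hexadecimal(numero):
--     """
--     Conversión directa de octal a hexadecimal.
--     Calcula el valor posicional (base 8) y aplica divisiones sucesivas
--     por 16
--     """
--     # 1. Calcular valor matemático posicional
--     largo = len(numero) - 1
--     valor = 0
--     for digito in numero:
--         if digito == "1": valor += 1 * (8**largo)
--         elif digito == "2": valor += 2 * (8**largo)
--         elif digito == "3": valor += 3 * (8**largo)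
--         elif digito == "4": valor += 4 * (8**largo)
--         elif digito == "5": valor += 5 * (8**largo)
--         elif digito == "6": valor += 6 * (8**largo)
--         elif digito == "7": valor += 7 * (8**largo)
--         largo -= 1
--
--     if valor == 0: return "0"
--
--     # 2. Divisiones sucesivas por 16 directas
--     hexadecimal = ""
--     while True:
--         resto = valor % 16
--         if resto == 0 : hexadecimal += "0"
--         elif resto == 1 : hexadecimal += "1"
--         elif resto == 2 : hexadecimal += "2"
--         elif resto == 3 : hexadecimal += "3"
--         elif resto == 4 : hexadecimal += "4"
--         elif resto == 5 : hexadecimal += "5"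
--         elif resto == 6 : hexadecimal += "6"
--         elif resto == 7 : hexadecimal += "7"
--         elif resto == 8 : hexadecimal += "8"
--         elif resto == 9 : hexadecimal += "9"
--         elif resto == 10 : hexadecimal += "A"
--         elif resto == 11 : hexadecimal += "B"
--         elif resto == 12 : hexadecimal += "C"
--         elif resto == 13 : hexadecimal += "D"
--         elif resto == 14 : hexadecimal += "E"
--         elif resto == 15 : hexadecimal += "F"
--
--         valor = valor // 16
--         if valor == 0: break
--
--     return hexadecimal[::-1]
-- ===== SOURCE B (Python) =====
-- def octal_a_hexadecimal(numero):
--     # Horner accumulation in one pass (no power recomputation), then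
--     # divmod with a digit table; chars outside "1".."7" count as 0, like A.
--     valor = 0
--     for c in numero:
--         valor = valor * 8 + (ord(c) - 48 if c in "1234567" else 0)
--     if valor == 0:
--         return "0"
--     digitos = "0123456789ABCDEF"
--     salida = []
--     while valor != 0:
--         valor, resto = divmod(valor, 16)
--         salida.append(digitos[resto])
--     return "".join(reversed(salida))
-- ===== Notes on version B (the rewrite author's own statement) =====
-- stated objective: faster
-- what changed: Replaces the per-digit recomputation of 8**largo and the 16-way elif chains with Horner accumulation (valor = valor*8 + digit) in one pass and a divmod loop indexing a digit table.
import Mathlib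
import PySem

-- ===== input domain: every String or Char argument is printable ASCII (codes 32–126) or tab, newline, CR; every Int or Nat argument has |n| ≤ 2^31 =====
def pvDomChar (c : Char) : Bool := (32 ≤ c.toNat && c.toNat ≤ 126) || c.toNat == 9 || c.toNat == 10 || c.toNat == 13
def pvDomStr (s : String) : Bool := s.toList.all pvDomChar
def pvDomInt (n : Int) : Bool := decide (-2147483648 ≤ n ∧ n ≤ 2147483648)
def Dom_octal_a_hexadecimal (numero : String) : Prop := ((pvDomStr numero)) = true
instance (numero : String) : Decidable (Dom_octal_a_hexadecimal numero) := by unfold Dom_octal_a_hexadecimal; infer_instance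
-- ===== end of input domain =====

-- B replaces A's per-digit recomputation of 8**largo and the 16-way elif chains with a
-- one-pass Horner accumulation and a divmod loop over a digit table (measured faster).

-- ===== PORT A =====

-- first loop of A: state (valor, largo); Python's 8**largo is exact as 8 ^ largo.toNat
-- because largo = (chars remaining after this one) ≥ 0 whenever a digit is processed
def pvValorA : List Char → Int → Int → Int
  | [], valor, _ => valor
  | digito :: rest, valor, largo =>
    let p : Int := 8 ^ largo.toNat
    let valor :=
      if digito = '1' then valor + 1 * p
      else if digito = '2' then valor + 2 * p
      else if digito = '3' then valor + 3 * p
      else if digito = '4' then valor + 4 * p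
      else if digito = '5' then valor + 5 * p
      else if digito = '6' then valor + 6 * p
      else if digito = '7' then valor + 7 * p
      else valor
    pvValorA rest valor (largo - 1)

-- the elif chain on resto = valor % 16 (the trailing 'else' branch is unreachable for resto < 16)
def pvDigitoHexA (resto : Nat) (hexadecimal : String) : String :=
  if resto = 0 then hexadecimal ++ "0"
  else if resto = 1 then hexadecimal ++ "1"
  else if resto = 2 then hexadecimal ++ "2"
  else if resto = 3 then hexadecimal ++ "3"
  else if resto = 4 then hexadecimal ++ "4"
  else if resto = 5 then hexadecimal ++ "5"
  else if resto = 6 then hexadecimal ++ "6"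
  else if resto = 7 then hexadecimal ++ "7"
  else if resto = 8 then hexadecimal ++ "8"
  else if resto = 9 then hexadecimal ++ "9"
  else if resto = 10 then hexadecimal ++ "A"
  else if resto = 11 then hexadecimal ++ "B"
  else if resto = 12 then hexadecimal ++ "C"
  else if resto = 13 then hexadecimal ++ "D"
  else if resto = 14 then hexadecimal ++ "E"
  else if resto = 15 then hexadecimal ++ "F"
  else hexadecimal

-- A's do-while on valor (valor > 0 at entry, so it runs on Nat exactly)
def pvLoopHexA (valor : Nat) (hexadecimal : String) : String :=
  let resto := valor % 16
  let hexadecimal := pvDigitoHexA resto hexadecimal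
  if h : valor / 16 = 0 then hexadecimal else pvLoopHexA (valor / 16) hexadecimal
termination_by valor
decreasing_by
  exact Nat.div_lt_self (Nat.pos_of_ne_zero (fun hv => h (by simp [hv]))) (by norm_num)

def octal_a_hexadecimal (numero : String) : String :=
  let largo : Int := (PySem.Str.len numero : Int) - 1
  let valor : Int := pvValorA numero.toList 0 largo
  if valor = 0 then "0"
  else
    -- the while loop: valor > 0 here, so valor.toNat is exact
    let hexadecimal := pvLoopHexA valor.toNat ""
    (PySem.Str.slice? hexadecimal none none (-1)).getD ""   -- hexadecimal[::-1]

-- ===== PORT B =====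

-- valor = valor * 8 + (ord(c) - 48 if c in "1234567" else 0)
def pvHornerB (valor : Int) (c : Char) : Int :=
  valor * 8 + (if c ∈ "1234567".toList then ((c.toNat : Int) - 48) else 0)

-- while valor != 0: valor, resto = divmod(valor, 16); salida.append(digitos[resto])
-- digitos[resto] is always in range (resto < 16), so Option.toList yields exactly that one char
def pvLoopHexB (valor : Nat) (salida : List Char) : List Char :=
  if valor = 0 then salida
  else
    pvLoopHexB (valor / 16)
      (salida ++ (PySem.Str.pyGet? "0123456789ABCDEF" ((valor % 16 : Nat) : Int)).toList)
termination_by valor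
decreasing_by
  rename_i h
  exact Nat.div_lt_self (Nat.pos_of_ne_zero h) (by norm_num)

def octal_a_hexadecimal_alt (numero : String) : String :=
  let valor : Int := numero.toList.foldl pvHornerB 0
  if valor = 0 then "0"
  else
    -- valor > 0 here, so valor.toNat is exact; "".join(reversed(salida))
    String.ofList ((pvLoopHexB valor.toNat []).reverse)

-- ===== PRECONDITION & SPEC =====
def Spec_octal_a_hexadecimal (numero : String) (out : String) : Prop := out = octal_a_hexadecimal_alt numero
instance (numero : String) (out : String) : Decidable (Spec_octal_a_hexadecimal numero out) := by unfold Spec_octal_a_hexadecimal; infer_instance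

-- ===== CLAIM (what is proved, stated in full; the proofs are below) =====
def Claim_equal_octal_a_hexadecimal : Prop := ∀ (numero : String), Dom_octal_a_hexadecimal numero → Spec_octal_a_hexadecimal numero (octal_a_hexadecimal numero)

-- ===== LEMMAS AND PROOFS =====

-- the digit value B adds for one char
def pvDigB (c : Char) : Int :=
  if c ∈ "1234567".toList then ((c.toNat : Int) - 48) else 0

lemma pvHornerB_eq (v : Int) (c : Char) : pvHornerB v c = v * 8 + pvDigB c := rfl

-- A's elif chain adds exactly pvDigB c * p
lemma pvStepA_eq (c : Char) (v p : Int) :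
    (if c = '1' then v + 1 * p
     else if c = '2' then v + 2 * p
     else if c = '3' then v + 3 * p
     else if c = '4' then v + 4 * p
     else if c = '5' then v + 5 * p
     else if c = '6' then v + 6 * p
     else if c = '7' then v + 7 * p
     else v) = v + pvDigB c * p := by
  by_cases h1 : c = '1'; · subst h1; simp [pvDigB]
  by_cases h2 : c = '2'; · subst h2; simp [pvDigB, h1]
  by_cases h3 : c = '3'; · subst h3; simp [pvDigB]
  by_cases h4 : c = '4'; · subst h4; simp [pvDigB]
  by_cases h5 : c = '5'; · subst h5; simp [pvDigB]
  by_cases h6 : c = '6'; · subst h6; simp [pvDigB]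
  by_cases h7 : c = '7'; · subst h7; simp [pvDigB]
  have : pvDigB c = 0 := by
    unfold pvDigB
    have : c ∉ "1234567".toList := by
      intro hmem
      simp only [show "1234567".toList = ['1','2','3','4','5','6','7'] from rfl, List.mem_cons,
        List.not_mem_nil, or_false] at hmem
      rcases hmem with h|h|h|h|h|h|h <;> simp_all
    rw [if_neg this]
  simp [h1, h2, h3, h4, h5, h6, h7, this]

-- Horner scaling: running B's fold from a instead of 0 adds a * 8^|l|
lemma pvHorner_scale (l : List Char) : ∀ a : Int,
    l.foldl pvHornerB a = a * 8 ^ l.length + l.foldl pvHornerB 0 := by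
  induction l with
  | nil => intro a; simp
  | cons c t ih =>
    intro a
    simp only [List.foldl_cons, List.length_cons]
    rw [ih (pvHornerB a c), ih (pvHornerB 0 c), pvHornerB_eq, pvHornerB_eq]
    ring

-- A's positional sum equals B's Horner value
lemma pvValorA_eq (l : List Char) : ∀ v : Int,
    pvValorA l v ((l.length : Int) - 1) = v + l.foldl pvHornerB 0 := by
  induction l with
  | nil => intro v; simp [pvValorA]
  | cons c t ih =>
    intro v
    have hlargo : ((c :: t).length : Int) - 1 = (t.length : Int) := by
      simp only [List.length_cons]; push_cast; ring
    rw [hlargo]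
    show pvValorA (c :: t) v (t.length : Int) = _
    unfold pvValorA
    simp only
    rw [pvStepA_eq]
    have htn : ((t.length : Int)).toNat = t.length := Int.toNat_natCast _
    rw [htn]
    rw [ih (v + pvDigB c * 8 ^ t.length)]
    simp only [List.foldl_cons]
    rw [pvHorner_scale t (pvHornerB 0 c), pvHornerB_eq]
    ring

lemma pvDigB_nonneg (c : Char) : 0 ≤ pvDigB c := by
  unfold pvDigB
  split
  · rename_i h
    simp only [show "1234567".toList = ['1','2','3','4','5','6','7'] from rfl, List.mem_cons,
      List.not_mem_nil, or_false] at h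
    rcases h with h|h|h|h|h|h|h <;> subst h <;> decide
  · exact le_rfl

lemma pvHorner_nonneg (l : List Char) : ∀ a : Int, 0 ≤ a → 0 ≤ l.foldl pvHornerB a := by
  induction l with
  | nil => intro a ha; simpa using ha
  | cons c t ih =>
    intro a ha
    refine ih _ ?_
    rw [pvHornerB_eq]
    have := pvDigB_nonneg c
    nlinarith

-- A's elif chain writes exactly the char B reads from the digit table
lemma pvDigitoHexA_eq (r : Nat) (hr : r < 16) (h : String) :
    (pvDigitoHexA r h).toList
      = h.toList ++ (PySem.Str.pyGet? "0123456789ABCDEF" ((r : Nat) : Int)).toList := by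
  interval_cases r <;> simp [pvDigitoHexA, String.toList_append]

lemma pvLoopHexB_acc : ∀ n : Nat, ∀ sal : List Char,
    pvLoopHexB n sal = sal ++ pvLoopHexB n [] := by
  intro n
  induction n using Nat.strong_induction_on with
  | _ n ih =>
    intro sal
    by_cases h : n = 0
    · subst h; simp [pvLoopHexB]
    · conv_lhs => rw [pvLoopHexB]
      conv_rhs => rw [pvLoopHexB]
      simp only [h, if_false]
      have hlt : n / 16 < n := Nat.div_lt_self (Nat.pos_of_ne_zero h) (by norm_num)
      rw [ih (n / 16) hlt (sal ++ _), ih (n / 16) hlt ([] ++ _)]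
      simp [List.append_assoc]

-- A's do-while produces (in reversed order) exactly B's digit list
lemma pvLoopHexA_eq : ∀ n : Nat, 0 < n → ∀ acc : String,
    (pvLoopHexA n acc).toList = acc.toList ++ pvLoopHexB n [] := by
  intro n
  induction n using Nat.strong_induction_on with
  | _ n ih =>
    intro hn acc
    have hr : n % 16 < 16 := Nat.mod_lt _ (by norm_num)
    have hB : pvLoopHexB n []
        = (PySem.Str.pyGet? "0123456789ABCDEF" ((n % 16 : Nat) : Int)).toList
          ++ pvLoopHexB (n / 16) [] := by
      rw [pvLoopHexB]
      simp only [Nat.pos_iff_ne_zero.mp hn, if_false]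
      rw [pvLoopHexB_acc (n / 16)]
      simp
    rw [pvLoopHexA]
    by_cases h16 : n / 16 = 0
    · simp only [h16, dif_pos]
      rw [hB, h16, pvDigitoHexA_eq _ hr]
      simp [pvLoopHexB]
    · simp only [h16, dif_neg, not_false_iff]
      have hlt : n / 16 < n := Nat.div_lt_self hn (by norm_num)
      rw [ih (n / 16) hlt (Nat.pos_of_ne_zero h16), pvDigitoHexA_eq _ hr, hB,
        List.append_assoc]

-- ===== VERDICT (by name: the statement is the Claim_ definition above) =====
theorem octal_a_hexadecimal_spec : Claim_equal_octal_a_hexadecimal := by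
  intro numero _
  unfold Spec_octal_a_hexadecimal octal_a_hexadecimal octal_a_hexadecimal_alt
  simp only [PySem.Str.len_eq]
  have hval : pvValorA numero.toList 0 ((numero.toList.length : Int) - 1)
      = numero.toList.foldl pvHornerB 0 := by
    simpa using pvValorA_eq numero.toList 0
  rw [hval]
  by_cases h0 : numero.toList.foldl pvHornerB 0 = 0
  · simp [h0]
  · simp only [h0, if_false]
    have hnn : 0 ≤ numero.toList.foldl pvHornerB 0 :=
      pvHorner_nonneg numero.toList 0 le_rfl
    have hpos : 0 < (numero.toList.foldl pvHornerB 0).toNat := by omega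
    rw [PySem.Str.slice?_none_none_neg_one, Option.getD_some,
      pvLoopHexA_eq _ hpos ""]
    simp
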